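-- pv_equiv track=rewrite | github.com/pairing-with-matt-and-mike/pairing | aoc-2019-24/main.py | biodiversity
-- ===== SOURCE A (Python) =====
-- def biodiversity(layout):
--     cells = [
--         cell
--         for row in layout
--         for cell in row
--     ]
--
--     biodiversity = 0
--     for index, cell in enumerate(cells):
--         if cell == "#":
--             biodiversity += 2 ** index
--
--     return biodiversity
-- ===== SOURCE B (Python) =====
-- def biodiversity(layout):
--     value = 0
--     for row in reversed(layout):
--         for cell in reversed(row):
--             value = value * 2 + (1 if cell == "#" else 0)
--     return value
-- ===== Notes on version B (the rewrite author's own statement) =====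
-- stated objective: alternative
-- what changed: Replaces the enumerate-and-sum of explicit 2**index powers by a back-to-front Horner accumulation (value = value*2 + bit) over the reversed rows and cells, with no index bookkeeping or bignum power computation.
import Mathlib
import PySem

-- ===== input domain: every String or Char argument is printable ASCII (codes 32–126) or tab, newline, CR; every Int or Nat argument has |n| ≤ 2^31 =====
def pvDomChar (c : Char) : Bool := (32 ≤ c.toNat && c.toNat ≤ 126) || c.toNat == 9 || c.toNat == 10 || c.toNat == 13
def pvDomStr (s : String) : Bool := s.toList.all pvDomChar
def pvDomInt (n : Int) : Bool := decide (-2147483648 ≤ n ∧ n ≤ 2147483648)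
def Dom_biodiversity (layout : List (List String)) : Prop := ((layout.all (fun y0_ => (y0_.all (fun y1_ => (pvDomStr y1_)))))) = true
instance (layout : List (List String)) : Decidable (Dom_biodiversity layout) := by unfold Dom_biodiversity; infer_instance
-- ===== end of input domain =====

-- B replaces A's enumerate-and-sum of explicit 2^index terms by a reverse-order Horner accumulation; objective: alternative (same cost).

-- ===== PORT A =====
-- 2 ** index: index comes from enumerate starting at 0, so it is ≥ 0 and .toNat is exact
def biodiversity (layout : List (List String)) : Int :=
  let cells := layout.flatMap (fun row => row)
  (PySem.List.enumerate cells 0).foldl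
    (fun b p => if p.2 = "#" then b + 2 ^ p.1.toNat else b) 0

-- ===== PORT B =====
def biodiversity_alt (layout : List (List String)) : Int :=
  layout.reverse.foldl
    (fun v row => row.reverse.foldl
      (fun v cell => v * 2 + (if cell = "#" then 1 else 0)) v) 0

-- ===== PRECONDITION & SPEC =====
def Spec_biodiversity (layout : List (List String)) (out : Int) : Prop := out = biodiversity_alt layout
instance (layout : List (List String)) (out : Int) : Decidable (Spec_biodiversity layout out) := by unfold Spec_biodiversity; infer_instance

-- ===== CLAIM (what is proved, stated in full; the proofs are below) =====
def Claim_equal_biodiversity : Prop := ∀ (layout : List (List String)), Dom_biodiversity layout → Spec_biodiversity layout (biodiversity layout)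

-- ===== LEMMAS AND PROOFS =====

-- Horner evaluation of a cell list onto accumulator v (head = least significant bit)
def pvHorner (cells : List String) (v : Int) : Int :=
  cells.foldr (fun cell v => v * 2 + (if cell = "#" then 1 else 0)) v

theorem pvHorner_append (xs ys : List String) (v : Int) :
    pvHorner (xs ++ ys) v = pvHorner xs (pvHorner ys v) := by
  simp [pvHorner, List.foldr_append]

-- A's enumerate-fold equals the Horner value, shifted by 2^s
theorem pvEnumFold (cells : List String) (s : Nat) (b : Int) :
    (PySem.List.enumerate cells (s : Int)).foldl
      (fun b p => if p.2 = "#" then b + 2 ^ p.1.toNat else b) b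
    = b + 2 ^ s * pvHorner cells 0 := by
  induction cells generalizing s b with
  | nil => simp [PySem.List.enumerate_nil, pvHorner]
  | cons c cs ih =>
    rw [PySem.List.enumerate_cons]
    have h1 : ((s : Int) + 1) = ((s + 1 : Nat) : Int) := by push_cast; ring
    simp only [List.foldl_cons, h1, ih]
    simp only [pvHorner, List.foldr_cons, Int.toNat_natCast]
    split_ifs <;> simp [pow_succ] <;> ring

-- B's nested reverse-folds equal the Horner value of the flattened cells
theorem pvAltHorner (layout : List (List String)) (v : Int) :
    layout.reverse.foldl
      (fun v row => row.reverse.foldl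
        (fun v cell => v * 2 + (if cell = "#" then 1 else 0)) v) v
    = pvHorner (layout.flatMap (fun row => row)) v := by
  induction layout generalizing v with
  | nil => simp [pvHorner]
  | cons r rs ih =>
    simp only [List.reverse_cons, List.foldl_append, List.foldl_cons, List.foldl_nil,
      List.flatMap_cons, pvHorner_append]
    rw [ih]
    simp [pvHorner, List.foldl_reverse]

-- ===== VERDICT (by name: the statement is the Claim_ definition above) =====
theorem biodiversity_spec : Claim_equal_biodiversity := by
  intro layout _
  unfold Spec_biodiversity biodiversity biodiversity_alt
  have := pvEnumFold (layout.flatMap (fun row => row)) 0 0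
  simp only [Nat.cast_zero] at this
  rw [this, pvAltHorner]
  simp
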